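-- pv_equiv track=rewrite | github.com/Laura-Doan/nonogramSolver | main.py | strike_possibilities
-- ===== SOURCE A (Python) =====
-- def strike_possibilities(possible, line):
--     item = 0
--     num_possibilities = len(possible)-1
--     while item <= num_possibilities:
--         possibility = possible[item]
--         for location in range(len(line)):
--             if line[location] != '*' and possibility[location] != line[location]:
--                 del possible[item]
--                 item -= 1
--                 num_possibilities -= 1
--                 break
--         item += 1
--     return possible
-- ===== SOURCE B (Python) =====
-- def strike_possibilities(possible, line):
--     constraints = [(i, c) for i, c in enumerate(line) if c != '*']
--     possible[:] = [p for p in possible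
--                    if all(p[i] == c for i, c in constraints)]
--     return possible
-- ===== Notes on version B (the rewrite author's own statement) =====
-- stated objective: faster
-- what changed: Replaces the in-place while-loop with index bookkeeping (del possible[item], item -= 1, num_possibilities -= 1) by building the constrained-position list once and filtering with a single list comprehension assigned back in place, so the argument is mutated like A; this removes the O(n) element shift A pays for every deletion.
import Mathlib
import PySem

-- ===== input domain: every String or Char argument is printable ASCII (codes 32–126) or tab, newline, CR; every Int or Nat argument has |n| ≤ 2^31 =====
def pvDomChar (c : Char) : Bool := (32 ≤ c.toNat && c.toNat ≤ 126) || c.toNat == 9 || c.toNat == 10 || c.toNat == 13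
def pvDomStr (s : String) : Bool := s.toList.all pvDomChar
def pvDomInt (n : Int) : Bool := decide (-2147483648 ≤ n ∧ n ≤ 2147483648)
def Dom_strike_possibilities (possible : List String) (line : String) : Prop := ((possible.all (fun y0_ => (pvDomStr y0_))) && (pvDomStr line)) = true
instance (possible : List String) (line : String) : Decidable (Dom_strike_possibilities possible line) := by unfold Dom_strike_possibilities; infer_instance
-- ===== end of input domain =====

-- B replaces A's in-place while loop with index bookkeeping by a precomputed constraint
-- list and one filter (idiomatic); B performs the same in-place mutation as A.

-- ===== PORT A =====
-- inner 'for location in range(len(line))' scan: true = a mismatch was found (break/del)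
def pvABad (p : List Char) (pairs : List (Int × Char)) : Bool :=
  match pairs with
  | [] => false
  | (loc, c) :: rest =>
    if c != '*' && !(PySem.List.pyGet? p loc == some c) then true
    else pvABad p rest

-- the while loop with 'del possible[item]; item -= 1; num_possibilities -= 1' visits each
-- remaining element once in order, dropping the mismatching ones in place
def pvALoop (possible : List String) (L : List Char) : List String :=
  match possible with
  | [] => []
  | p :: rest =>
    if pvABad p.toList (PySem.List.enumerate L) then pvALoop rest L
    else p :: pvALoop rest L

def strike_possibilities (possible : List String) (line : String) : List String :=
  pvALoop possible line.toList

-- ===== PORT B =====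
def strike_possibilities_alt (possible : List String) (line : String) : List String :=
  let constraints := (PySem.List.enumerate line.toList).filter (fun iv => iv.2 != '*')
  possible.filter (fun p => constraints.all (fun iv => PySem.List.pyGet? p.toList iv.1 == some iv.2))

-- ===== PRECONDITION & SPEC =====
-- Pre_ excludes exactly the ragged inputs on which the Python raises IndexError: a possibility
-- shorter than the line whose first deciding constrained position (line[i] != '*') is out of
-- range, with no earlier in-range constrained mismatch that would break first.
def Pre_strike_possibilities (possible : List String) (line : String) : Prop :=
  ∀ p ∈ possible, ∀ i < line.toList.length,
    (line.toList[i]! ≠ '*' ∧ p.toList.length ≤ i) →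
      ∃ j < i, line.toList[j]! ≠ '*' ∧ j < p.toList.length ∧ p.toList[j]! ≠ line.toList[j]!
instance (possible : List String) (line : String) : Decidable (Pre_strike_possibilities possible line) := by unfold Pre_strike_possibilities; infer_instance
def pvWitness_strike_possibilities : List String × String := (["ab", "cb", "xy"], "a*")

def Spec_strike_possibilities (possible : List String) (line : String) (out : List String) : Prop := out = strike_possibilities_alt possible line
instance (possible : List String) (line : String) (out : List String) : Decidable (Spec_strike_possibilities possible line out) := by unfold Spec_strike_possibilities; infer_instance

-- ===== CLAIM (what is proved, stated in full; the proofs are below) =====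
def Claim_equal_strike_possibilities : Prop := ∀ (possible : List String) (line : String), Dom_strike_possibilities possible line → Pre_strike_possibilities possible line → Spec_strike_possibilities possible line (strike_possibilities possible line)

-- ===== LEMMAS AND PROOFS =====

-- A's ordered scan with the '*'-skip equals B's 'all' over the precomputed constraints
theorem pvABad_eq_not_all (p : List Char) (pairs : List (Int × Char)) :
    pvABad p pairs
      = !((pairs.filter (fun iv => iv.2 != '*')).all
            (fun iv => PySem.List.pyGet? p iv.1 == some iv.2)) := by
  induction pairs with
  | nil => rfl
  | cons hd tl ih =>
    obtain ⟨loc, c⟩ := hd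
    by_cases hc : c = '*'
    · simp [pvABad, hc, List.filter, ih]
    · have hc' : (c != '*') = true := by simp [hc]
      by_cases hm : PySem.List.pyGet? p loc == some c
      · simp [pvABad, hc', hm, List.filter, ih]
      · simp [pvABad, hc', hm, List.filter]

theorem pvALoop_eq_filter (possible : List String) (L : List Char) :
    pvALoop possible L
      = possible.filter
          (fun p => ((PySem.List.enumerate L).filter (fun iv => iv.2 != '*')).all
              (fun iv => PySem.List.pyGet? p.toList iv.1 == some iv.2)) := by
  induction possible with
  | nil => rfl
  | cons p rest ih =>
    simp only [pvALoop, pvABad_eq_not_all, List.filter, ih]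
    by_cases h : ((PySem.List.enumerate L).filter (fun iv => iv.2 != '*')).all
        (fun iv => PySem.List.pyGet? p.toList iv.1 == some iv.2)
    · simp [h]
    · simp [h]

-- ===== VERDICT (by name: the statement is the Claim_ definition above) =====
theorem strike_possibilities_spec : Claim_equal_strike_possibilities := by
  intro possible line _ _
  unfold Spec_strike_possibilities strike_possibilities strike_possibilities_alt
  exact pvALoop_eq_filter possible line.toList
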